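-- pv_equiv track=rewrite | github.com/Soistesimmer/AMR-multiview | AMRdata-multiview/generate_parent_index.py | find_al2
-- ===== SOURCE A (Python) =====
-- def find_al2(al2, start, end):
--     for index, token in enumerate(al2):
--         start=int(start)
--         end=int(end)
--         if token[0] == start:
--             for token in al2[index:]:
--                 if token[0] == end:
--                     return token[1]
-- ===== SOURCE B (Python) =====
-- def find_al2(al2, start, end):
--     seen = False
--     for token in al2:
--         if token[0] == int(start):
--             seen = True
--         if seen and token[0] == int(end):
--             return token[1]
--     return None
-- ===== Notes on version B (the rewrite author's own statement) =====
-- stated objective: simpler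
-- what changed: Replaced A's nested scan (enumerate to the first start token, then rescan the suffix for the end token) by a single linear pass with a seen_start flag that returns the first end token at or after the first start token.
import Mathlib
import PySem

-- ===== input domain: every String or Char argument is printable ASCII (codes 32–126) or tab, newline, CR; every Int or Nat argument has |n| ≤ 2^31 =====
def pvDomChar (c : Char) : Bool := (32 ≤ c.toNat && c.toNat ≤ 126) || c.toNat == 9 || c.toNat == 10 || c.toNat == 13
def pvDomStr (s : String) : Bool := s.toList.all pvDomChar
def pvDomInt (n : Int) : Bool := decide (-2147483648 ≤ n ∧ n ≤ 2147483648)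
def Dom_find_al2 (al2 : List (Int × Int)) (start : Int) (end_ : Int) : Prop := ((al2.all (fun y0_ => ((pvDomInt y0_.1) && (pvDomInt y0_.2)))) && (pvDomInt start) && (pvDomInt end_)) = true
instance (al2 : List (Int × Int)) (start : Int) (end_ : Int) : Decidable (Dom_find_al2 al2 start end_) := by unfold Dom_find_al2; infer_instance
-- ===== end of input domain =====

-- B replaces A's nested scan (find first start token, rescan suffix for end) by one linear pass with a seen-start flag; simpler, same return value.


-- ===== PORT A =====
-- inner loop: 'for token in al2[index:]: if token[0] == end: return token[1]'
def pvInnerA (end_ : Int) (l : List (Int × Int)) : Option Int :=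
  match l with
  | [] => none
  | t :: rest => if t.1 == end_ then some t.2 else pvInnerA end_ rest

-- outer loop over enumerate(al2); int(start)/int(end) are the identity on Int
def pvOuterA (al2 : List (Int × Int)) (start end_ : Int) (ps : List (Int × (Int × Int))) : Option Int :=
  match ps with
  | [] => none
  | (index, token) :: rest =>
    if token.1 == start then
      match pvInnerA end_ (PySem.List.slice al2 (some index) none) with
      | some v => some v
      | none => pvOuterA al2 start end_ rest
    else pvOuterA al2 start end_ rest

def find_al2 (al2 : List (Int × Int)) (start : Int) (end_ : Int) : Option Int :=
  pvOuterA al2 start end_ (PySem.List.enumerate al2 0)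

-- ===== PORT B =====
-- single pass with a seen-start flag
def pvGoB (start end_ : Int) (l : List (Int × Int)) (seen : Bool) : Option Int :=
  match l with
  | [] => none
  | t :: rest =>
    let seen' := if t.1 == start then true else seen
    if seen' && (t.1 == end_) then some t.2 else pvGoB start end_ rest seen'

def find_al2_alt (al2 : List (Int × Int)) (start : Int) (end_ : Int) : Option Int :=
  pvGoB start end_ al2 false

-- ===== PRECONDITION & SPEC =====
def Spec_find_al2 (al2 : List (Int × Int)) (start : Int) (end_ : Int) (out : Option Int) : Prop := out = find_al2_alt al2 start end_
instance (al2 : List (Int × Int)) (start : Int) (end_ : Int) (out : Option Int) : Decidable (Spec_find_al2 al2 start end_ out) := by unfold Spec_find_al2; infer_instance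

-- ===== CLAIM (what is proved, stated in full; the proofs are below) =====
def Claim_equal_find_al2 : Prop := ∀ (al2 : List (Int × Int)) (start : Int) (end_ : Int), Dom_find_al2 al2 start end_ → Spec_find_al2 al2 start end_ (find_al2 al2 start end_)

-- ===== LEMMAS AND PROOFS =====

-- if the suffix has no end token, B's scan of it yields none whatever the flag is
theorem pvGoB_of_inner_none (start end_ : Int) :
    ∀ (l : List (Int × Int)) (b : Bool), pvInnerA end_ l = none → pvGoB start end_ l b = none := by
  intro l
  induction l with
  | nil => intro b _; rfl
  | cons t rest ih =>
    intro b h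
    simp only [pvInnerA] at h
    by_cases he : t.1 == end_
    · simp [he] at h
    · have hrest : pvInnerA end_ rest = none := by simpa [he] using h
      simp only [pvGoB]
      rw [if_neg (by simp [he])]
      exact ih _ hrest

-- once the flag is set, B's scan is exactly A's inner scan
theorem pvGoB_true (start end_ : Int) (l : List (Int × Int)) :
    pvGoB start end_ l true = pvInnerA end_ l := by
  induction l with
  | nil => rfl
  | cons t rest ih =>
    simp only [pvGoB, pvInnerA]
    by_cases hs : t.1 == start <;> by_cases he : t.1 == end_ <;> simp [hs, he, ih]

theorem pvGoB_cons_start (start end_ : Int) (t : Int × Int) (rest : List (Int × Int))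
    (hs : (t.1 == start) = true) : pvGoB start end_ (t :: rest) false = pvInnerA end_ (t :: rest) := by
  simp only [pvGoB, pvInnerA, hs]
  by_cases he : t.1 == end_ <;> simp [he, pvGoB_true]

theorem pvMain (al2 : List (Int × Int)) (start end_ : Int) :
    ∀ (l : List (Int × Int)) (k : Nat), al2.drop k = l →
      pvOuterA al2 start end_ (PySem.List.enumerate l (k : Int)) = pvGoB start end_ l false := by
  intro l
  induction l with
  | nil => intro k _; rfl
  | cons t rest ih =>
    intro k hk
    have hk1 : al2.drop (k + 1) = rest := by
      have := congrArg List.tail hk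
      simpa [List.tail_drop] using this
    have hkl : k < al2.length := by
      by_contra h
      have : al2.drop k = [] := List.drop_eq_nil_of_le (by omega)
      rw [hk] at this; exact (List.cons_ne_nil _ _) this
    have hslice : PySem.List.slice al2 (some (k : Int)) none = t :: rest := by
      rw [PySem.List.slice_some_none, PySem.List.clampIdx_natCast]
      rw [Nat.min_eq_left (by omega)]
      exact hk
    rw [PySem.List.enumerate_cons]
    have hcast : ((k : Int) + 1) = ((k + 1 : Nat) : Int) := by push_cast; ring
    by_cases hs : t.1 == start
    · simp only [pvOuterA, if_pos hs, hslice]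
      rw [pvGoB_cons_start start end_ t rest hs]
      cases hin : pvInnerA end_ (t :: rest) with
      | some v => simp
      | none =>
        have hrest : pvInnerA end_ rest = none := by
          simp only [pvInnerA] at hin
          by_cases he : t.1 == end_
          · simp [he] at hin
          · simpa [he] using hin
        rw [hcast, ih (k + 1) hk1]
        exact pvGoB_of_inner_none start end_ rest false hrest
    · simp only [pvOuterA]
      rw [if_neg (by simpa using hs)]
      have hflag : pvGoB start end_ (t :: rest) false = pvGoB start end_ rest false := by
        simp only [pvGoB]
        by_cases he : t.1 == end_ <;> simp [hs, he]
      rw [hflag, hcast]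
      exact ih (k + 1) hk1

-- ===== VERDICT (by name: the statement is the Claim_ definition above) =====
theorem find_al2_spec : Claim_equal_find_al2 := by
  intro al2 start end_ _
  unfold Spec_find_al2 find_al2 find_al2_alt
  exact pvMain al2 start end_ al2 0 rfl
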